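-- pv_equiv track=rewrite | github.com/maxdemaio/aoc-2022 | day01/part1.py | compute
-- ===== SOURCE A (Python) =====
-- def compute(s: str) -> int:
--     groups = s.split("\n\n")
--
--     elfCalCount = [0, 0, 0]
--
--     for group in groups:
--         lines = group.split("\n")
--         sum = 0
--         for line in lines:
--             sum += int(line)
--         if sum > elfCalCount[0]:
--             elfCalCount[2] = elfCalCount[1]
--             elfCalCount[1] = elfCalCount[0]
--             elfCalCount[0] = sum
--         elif sum > elfCalCount[1]:
--             elfCalCount[2] = elfCalCount[1]
--             elfCalCount[1] = sum
--         elif sum > elfCalCount[2]: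
--             elfCalCount[2] = sum
--
--     return elfCalCount[0]
-- ===== SOURCE B (Python) =====
-- def compute(s: str) -> int:
--     # single streaming pass over lines: a blank line ends the current elf's group
--     best = 0
--     cur = 0
--     for line in s.split("\n"):
--         if line == "":
--             if cur > best:
--                 best = cur
--             cur = 0
--         else:
--             cur += int(line)
--     if cur > best:
--         best = cur
--     return best
-- ===== Notes on version B (the rewrite author's own statement) =====
-- stated objective: alternative
-- what changed: B never splits on "\n\n" or forms group substrings: it streams over the individual lines once, treating a blank line as a group delimiter that flushes a running group sum into a single running maximum, replacing A's group list plus top-3 array with elif cascade.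
import Mathlib
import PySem

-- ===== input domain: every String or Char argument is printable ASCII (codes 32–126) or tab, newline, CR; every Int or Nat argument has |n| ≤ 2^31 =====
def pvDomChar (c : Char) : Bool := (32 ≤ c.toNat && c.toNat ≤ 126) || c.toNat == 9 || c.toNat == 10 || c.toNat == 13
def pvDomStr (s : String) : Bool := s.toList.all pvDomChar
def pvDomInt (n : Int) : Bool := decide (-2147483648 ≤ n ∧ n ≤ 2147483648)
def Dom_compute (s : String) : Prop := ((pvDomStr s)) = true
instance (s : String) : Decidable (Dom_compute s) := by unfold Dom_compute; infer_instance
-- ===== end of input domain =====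

-- B streams over individual lines once (blank line = group delimiter, running max) instead of
-- splitting into "\n\n" groups and maintaining A's top-3 array; equal cost, different decomposition.


-- ===== PORT A =====
-- split? with a nonempty literal separator is always some; getD [] never takes the default.
-- inner loop: sum += int(line); PySem.Int.ofStr? l = none ↔ int(line) raises ValueError,
-- excluded by Pre_compute, so getD 0 is never taken on admitted inputs.
def computeGroupSumA (g : String) : Int :=
  ((PySem.Str.split? g "\n").getD []).foldl (fun acc l => acc + (PySem.Int.ofStr? l).getD 0) 0

-- the if/elif/elif cascade updating the top-3 list [c0, c1, c2]
def computeStepA (st : Int × Int × Int) (g : String) : Int × Int × Int :=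
  let sum := computeGroupSumA g
  if sum > st.1 then (sum, st.1, st.2.1)
  else if sum > st.2.1 then (st.1, sum, st.2.1)
  else if sum > st.2.2 then (st.1, st.2.1, sum)
  else st

def compute (s : String) : Int :=
  (((PySem.Str.split? s "\n\n").getD []).foldl computeStepA (0, 0, 0)).1

-- ===== PORT B =====
-- state (best, cur); blank line flushes cur into best, otherwise cur += int(line)
def computeStepB (st : Int × Int) (line : String) : Int × Int :=
  if line == "" then (if st.2 > st.1 then st.2 else st.1, 0)
  else (st.1, st.2 + (PySem.Int.ofStr? line).getD 0)

def compute_alt (s : String) : Int :=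
  let st := ((PySem.Str.split? s "\n").getD []).foldl computeStepB (0, 0)
  if st.2 > st.1 then st.2 else st.1

-- ===== PRECONDITION & SPEC =====
-- Pre_ excludes exactly the inputs where A's int(line) raises ValueError (a non-integer line
-- inside some "\n\n"-group, e.g. the empty line produced by a run of 3+ newlines).
def Pre_compute (s : String) : Prop :=
  ∀ g ∈ (PySem.Str.split? s "\n\n").getD [], ∀ l ∈ (PySem.Str.split? g "\n").getD [],
    (PySem.Int.ofStr? l).isSome = true
instance (s : String) : Decidable (Pre_compute s) := by unfold Pre_compute; infer_instance

def pvWitness_compute : String := "1\n2\n\n-3\n\n10"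

def Spec_compute (s : String) (out : Int) : Prop := out = compute_alt s
instance (s : String) (out : Int) : Decidable (Spec_compute s out) := by unfold Spec_compute; infer_instance

-- ===== CLAIM (what is proved, stated in full; the proofs are below) =====
def Claim_equal_compute : Prop := ∀ (s : String), Dom_compute s → Pre_compute s → Spec_compute s (compute s)

-- ===== LEMMAS AND PROOFS =====

def consHd (c : Char) : List (List Char) → List (List Char)
  | [] => [[c]]
  | x :: xs => (c :: x) :: xs

def consPre (p : List Char) : List (List Char) → List (List Char)
  | [] => [p]
  | x :: xs => (p ++ x) :: xs

theorem go_spec (sep : List Char) (M : List Char → List (List Char))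
    (h0 : M [] = [[]])
    (hpre : ∀ l, sep.isPrefixOf l = true → M l = [] :: M (l.drop sep.length))
    (hcons : ∀ c rest, sep.isPrefixOf (c :: rest) = false → M (c :: rest) = consHd c (M rest))
    (hne : ∀ l, M l ≠ [])
    (hsep : sep ≠ []) :
    ∀ fuel (l cur : List Char) (acc : List (List Char)), l.length ≤ fuel →
      PySem.Chars.splitOn.go sep fuel l cur acc = acc.reverse ++ consPre cur.reverse (M l) := by
  intro fuel
  induction fuel with
  | zero =>
    intro l cur acc hl
    have : l = [] := by cases l <;> simp_all
    subst this
    rw [PySem.Chars.splitOn.go.eq_def]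
    simp [h0, consPre]
  | succ n ih =>
    intro l cur acc hl
    cases l with
    | nil =>
      rw [PySem.Chars.splitOn.go.eq_def]
      simp [h0, consPre]
    | cons c rest =>
      rw [PySem.Chars.splitOn.go.eq_def]
      simp only []
      by_cases hp : sep.isPrefixOf (c :: rest) = true
      · rw [if_pos hp]
        have hlen : (List.drop sep.length (c :: rest)).length ≤ n := by
          have h1 : 1 ≤ sep.length := by cases sep with | nil => exact absurd rfl hsep | cons a t => simp
          have h2 : (c :: rest).length = rest.length + 1 := by simp
          simp only [List.length_drop]
          simp at hl
          omega
        rw [ih _ _ _ hlen, hpre _ hp]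
        obtain ⟨x, xs, hx⟩ : ∃ x xs, M ((c :: rest).drop sep.length) = x :: xs := by
          rcases hM : M ((c :: rest).drop sep.length) with _ | ⟨x, xs⟩
          · exact absurd hM (hne _)
          · exact ⟨x, xs, rfl⟩
        simp [hx, consPre]
      · rw [if_neg hp]
        have hlen : rest.length ≤ n := by simp at hl; omega
        rw [ih _ _ _ hlen, hcons _ _ (Bool.not_eq_true _ ▸ eq_false_of_ne_true hp)]
        obtain ⟨x, xs, hx⟩ : ∃ x xs, M rest = x :: xs := by
          rcases hM : M rest with _ | ⟨x, xs⟩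
          · exact absurd hM (hne _)
          · exact ⟨x, xs, rfl⟩
        simp [hx, consPre, consHd]

def linesFn : List Char → List (List Char)
  | [] => [[]]
  | '\n' :: r => [] :: linesFn r
  | c :: r => consHd c (linesFn r)

def groupsFn : List Char → List (List Char)
  | [] => [[]]
  | '\n' :: '\n' :: r => [] :: groupsFn r
  | c :: r => consHd c (groupsFn r)

theorem linesFn_ne_nil (cs : List Char) : linesFn cs ≠ [] := by
  fun_induction linesFn cs <;> simp [consHd] <;> split <;> simp

theorem groupsFn_ne_nil (cs : List Char) : groupsFn cs ≠ [] := by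
  fun_induction groupsFn cs <;> simp [consHd] <;> split <;> simp

theorem splitOn_lines (cs : List Char) :
    PySem.Chars.splitOn cs ['\n'] = linesFn cs := by
  have h := go_spec ['\n'] linesFn rfl
    (by intro l hp
        cases l with
        | nil => simp at hp
        | cons c r =>
          simp [List.isPrefixOf] at hp
          cases hp
          simp [linesFn])
    (by intro c rest hp
        have hc : c ≠ '\n' := by
          simp [List.isPrefixOf] at hp; exact fun h => hp h.symm
        simp [linesFn, hc])
    linesFn_ne_nil (by simp)
  unfold PySem.Chars.splitOn
  rw [h (cs.length + 1) cs [] [] (by omega)]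
  rcases hM : linesFn cs with _ | ⟨x, xs⟩
  · exact absurd hM (linesFn_ne_nil cs)
  · simp [consPre]

theorem splitOn_groups (cs : List Char) :
    PySem.Chars.splitOn cs ['\n', '\n'] = groupsFn cs := by
  have h := go_spec ['\n', '\n'] groupsFn rfl
    (by intro l hp
        cases l with
        | nil => simp at hp
        | cons c r =>
          cases r with
          | nil => simp [List.isPrefixOf] at hp
          | cons c' r' =>
            simp [List.isPrefixOf] at hp
            obtain ⟨h1, h2⟩ := hp
            cases h1; cases h2
            simp [groupsFn])
    (by intro c rest hp
        cases rest with
        | nil =>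
          cases hc : (c == '\n') with
          | true => simp at hc; subst hc; simp [groupsFn, consHd]
          | false => simp at hc; simp [groupsFn, hc]
        | cons c' r' =>
          have : ¬ (c = '\n' ∧ c' = '\n') := by
            simp [List.isPrefixOf] at hp
            rintro ⟨h1, h2⟩; exact hp h1.symm h2.symm
          by_cases hc : c = '\n'
          · subst hc
            have hc' : c' ≠ '\n' := fun h => this ⟨rfl, h⟩
            simp [groupsFn, hc']
          · simp [groupsFn, hc])
    groupsFn_ne_nil (by simp)
  unfold PySem.Chars.splitOn
  rw [h (cs.length + 1) cs [] [] (by omega)]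
  rcases hM : groupsFn cs with _ | ⟨x, xs⟩
  · exact absurd hM (groupsFn_ne_nil cs)
  · simp [consPre]

def sepJoin : List (List Char) → List (List Char)
  | [] => []
  | [g] => linesFn g
  | g :: g' :: gs => linesFn g ++ [[]] ++ sepJoin (g' :: gs)

theorem sepJoin_cons_ne_nil (g : List Char) (gs : List (List Char)) :
    sepJoin (g :: gs) = linesFn g ++ (if gs = [] then [] else [[]] ++ sepJoin gs) := by
  cases gs <;> simp [sepJoin]

theorem consHd_append (c : Char) (xs ys : List (List Char)) (h : xs ≠ []) :
    consHd c (xs ++ ys) = consHd c xs ++ ys := by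
  cases xs with
  | nil => exact absurd rfl h
  | cons x xs => simp [consHd]

theorem lines_decomp (cs : List Char) : linesFn cs = sepJoin (groupsFn cs) := by
  induction hn : cs.length using Nat.strong_induction_on generalizing cs with
  | _ n ih =>
  subst hn
  match cs with
  | [] => simp [linesFn, groupsFn, sepJoin]
  | '\n' :: '\n' :: r =>
    have hr := ih r.length (by simp) r rfl
    rcases hg : groupsFn r with _ | ⟨g0, gs⟩
    · exact absurd hg (groupsFn_ne_nil r)
    · simp only [linesFn, groupsFn, hg] at *
      rw [sepJoin_cons_ne_nil, hr, sepJoin_cons_ne_nil]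
      simp [linesFn]
  | '\n' :: r =>
    -- overlapping-match goal: prove it for all r by subcasing on whether r starts with '\n'
    match r with
    | '\n' :: r' =>
      have hr := ih r'.length (by simp) r' rfl
      rcases hg : groupsFn r' with _ | ⟨g0, gs⟩
      · exact absurd hg (groupsFn_ne_nil r')
      · simp only [linesFn, groupsFn, hg] at *
        rw [sepJoin_cons_ne_nil, hr, sepJoin_cons_ne_nil]
        simp [linesFn]
    | [] => simp [linesFn, groupsFn, sepJoin, consHd]
    | c' :: r' =>
      by_cases hc' : c' = '\n'
      · subst hc'
        have hr := ih r'.length (by simp) r' rfl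
        rcases hg : groupsFn r' with _ | ⟨g0, gs⟩
        · exact absurd hg (groupsFn_ne_nil r')
        · simp only [linesFn, groupsFn, hg] at *
          rw [sepJoin_cons_ne_nil, hr, sepJoin_cons_ne_nil]
          simp [linesFn]
      · -- groupsFn ('\n'::c'::r') = consHd '\n' (groupsFn (c'::r'))
        have hr := ih (c' :: r').length (by simp) (c' :: r') rfl
        rcases hg : groupsFn (c' :: r') with _ | ⟨g0, gs⟩
        · exact absurd hg (groupsFn_ne_nil _)
        · have hgrp : groupsFn ('\n' :: c' :: r') = ('\n' :: g0) :: gs := by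
            simp [groupsFn, hc', hg, consHd]
          have hlin : linesFn ('\n' :: c' :: r') = [] :: linesFn (c' :: r') := by
            simp [linesFn]
          rw [hlin, hgrp, hr, hg, sepJoin_cons_ne_nil, sepJoin_cons_ne_nil]
          have : linesFn ('\n' :: g0) = [] :: linesFn g0 := by simp [linesFn]
          simp [this]
  | c :: r =>
    by_cases hc : c = '\n'
    · subst hc
      match r with
      | [] => simp [linesFn, groupsFn, sepJoin, consHd]
      | '\n' :: r' =>
        have hr := ih r'.length (by simp) r' rfl
        rcases hg : groupsFn r' with _ | ⟨g0, gs⟩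
        · exact absurd hg (groupsFn_ne_nil r')
        · simp only [linesFn, groupsFn, hg] at *
          rw [sepJoin_cons_ne_nil, hr, sepJoin_cons_ne_nil]
          simp [linesFn]
      | c' :: r' =>
        by_cases hc' : c' = '\n'
        · subst hc'
          have hr := ih r'.length (by simp) r' rfl
          rcases hg : groupsFn r' with _ | ⟨g0, gs⟩
          · exact absurd hg (groupsFn_ne_nil r')
          · simp only [linesFn, groupsFn, hg] at *
            rw [sepJoin_cons_ne_nil, hr, sepJoin_cons_ne_nil]
            simp [linesFn]
        · have hr := ih (c' :: r').length (by simp) (c' :: r') rfl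
          rcases hg : groupsFn (c' :: r') with _ | ⟨g0, gs⟩
          · exact absurd hg (groupsFn_ne_nil _)
          · have hgrp : groupsFn ('\n' :: c' :: r') = ('\n' :: g0) :: gs := by
              simp [groupsFn, hc', hg, consHd]
            have hlin : linesFn ('\n' :: c' :: r') = [] :: linesFn (c' :: r') := by
              simp [linesFn]
            rw [hlin, hgrp, hr, hg, sepJoin_cons_ne_nil, sepJoin_cons_ne_nil]
            have : linesFn ('\n' :: g0) = [] :: linesFn g0 := by simp [linesFn]
            simp [this]
    · have hr := ih r.length (by simp) r rfl
      rcases hg : groupsFn r with _ | ⟨g0, gs⟩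
      · exact absurd hg (groupsFn_ne_nil r)
      · have hgrp : groupsFn (c :: r) = (c :: g0) :: gs := by
          simp [groupsFn, hc, hg, consHd]
        have hlin : linesFn (c :: r) = consHd c (linesFn r) := by simp [linesFn, hc]
        have hlg : linesFn (c :: g0) = consHd c (linesFn g0) := by simp [linesFn, hc]
        rw [hlin, hgrp, hr, hg, sepJoin_cons_ne_nil, sepJoin_cons_ne_nil, hlg]
        rw [consHd_append c (linesFn g0) _ (linesFn_ne_nil g0)]


-- bridge: the string-level splits are the char-level reference splitters
theorem split_lines_str (s : String) :
    (PySem.Str.split? s "\n").getD [] = (linesFn s.toList).map String.ofList := by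
  simp [PySem.Str.split?, PySem.Chars.split?, show ("\n".toList = ['\n']) from rfl,
    splitOn_lines, String.ofList]

theorem split_groups_str (s : String) :
    (PySem.Str.split? s "\n\n").getD [] = (groupsFn s.toList).map String.ofList := by
  simp [PySem.Str.split?, PySem.Chars.split?, show ("\n\n".toList = ['\n','\n']) from rfl,
    splitOn_groups, String.ofList]

def okL (l : List Char) : Prop := (PySem.Int.ofStr? (String.ofList l)).isSome = true

theorem okL_ne_nil {l : List Char} (h : okL l) : l ≠ [] := by
  rintro rfl
  simp [okL] at h
  exact absurd h (by decide)

-- char-level group sum (A's inner loop on a group's char list)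
def sumA (gl : List Char) : Int :=
  (linesFn gl).foldl (fun acc l => acc + (PySem.Int.ofStr? (String.ofList l)).getD 0) 0

theorem groupSumA_eq (gl : List Char) : computeGroupSumA (String.ofList gl) = sumA gl := by
  unfold computeGroupSumA sumA
  rw [split_lines_str, String.toList_ofList, List.foldl_map]

def stepB' (st : Int × Int) (l : List Char) : Int × Int := computeStepB st (String.ofList l)

theorem stepB'_nonempty (st : Int × Int) (l : List Char) (h : l ≠ []) :
    stepB' st l = (st.1, st.2 + (PySem.Int.ofStr? (String.ofList l)).getD 0) := by
  unfold stepB' computeStepB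
  rw [if_neg]
  simp only [beq_iff_eq]
  intro he
  exact h (by have := congrArg String.toList he; simpa using this)

theorem stepB'_nil (st : Int × Int) : stepB' st [] = (if st.2 > st.1 then st.2 else st.1, 0) := by
  unfold stepB' computeStepB
  rw [if_pos (by rfl)]

-- folding B's step through one group's (nonempty-line) lines just accumulates the sum
theorem fold_group (ls : List (List Char)) : ∀ (b c : Int), (∀ l ∈ ls, l ≠ []) →
    ls.foldl stepB' (b, c) =
      (b, c + ls.foldl (fun acc l => acc + (PySem.Int.ofStr? (String.ofList l)).getD 0) 0) := by
  induction ls with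
  | nil => intro b c _; simp
  | cons l ls ih =>
    intro b c h
    have hl : l ≠ [] := h l (by simp)
    rw [List.foldl_cons, stepB'_nonempty _ _ hl, ih _ _ (fun x hx => h x (by simp [hx]))]
    rw [List.foldl_cons,
      PySem.List.foldl_add (l := ls) (fun l => (PySem.Int.ofStr? (String.ofList l)).getD 0),
      PySem.List.foldl_add (l := ls) (fun l => (PySem.Int.ofStr? (String.ofList l)).getD 0)]
    ring_nf

def flushFn (st : Int × Int) : Int := if st.2 > st.1 then st.2 else st.1

theorem stream_eq (gs : List (List Char)) : ∀ (best : Int),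
    (∀ g ∈ gs, ∀ l ∈ linesFn g, okL l) → gs ≠ [] →
    flushFn ((sepJoin gs).foldl stepB' (best, 0)) =
      gs.foldl (fun b g => if sumA g > b then sumA g else b) best := by
  induction gs with
  | nil => intro best _ h; exact absurd rfl h
  | cons g gs ih =>
    intro best hok _
    have hg : ∀ l ∈ linesFn g, l ≠ [] := fun l hl => okL_ne_nil (hok g (by simp) l hl)
    cases gs with
    | nil =>
      simp only [sepJoin]
      rw [fold_group _ _ _ hg]
      simp [sumA, flushFn]
    | cons g' gs' =>
      have hs : sepJoin (g :: g' :: gs') = linesFn g ++ [[]] ++ sepJoin (g' :: gs') := rfl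
      rw [hs, List.foldl_append, List.foldl_append, fold_group _ _ _ hg]
      show flushFn ((sepJoin (g' :: gs')).foldl stepB' (stepB' (best, 0 + sumA g) [])) = _
      rw [stepB'_nil]
      simp only [zero_add]
      rw [ih _ (fun x hx => hok x (by simp [hx])) (by simp)]
      rfl

theorem fold_fst (gs : List String) : ∀ (a b c : Int),
    (gs.foldl computeStepA (a, b, c)).1 =
      gs.foldl (fun best g => if computeGroupSumA g > best then computeGroupSumA g else best) a := by
  induction gs with
  | nil => intro a b c; rfl
  | cons g gs ih =>
    intro a b c
    simp only [List.foldl_cons, computeStepA]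
    split_ifs with h1 h2 h3 <;> simp [ih]

theorem compute_eq (s : String) :
    compute s = ((groupsFn s.toList).foldl
      (fun best g => if sumA g > best then sumA g else best) 0) := by
  unfold compute
  rw [fold_fst, split_groups_str, List.foldl_map]
  simp only [groupSumA_eq]

theorem compute_alt_eq (s : String) :
    compute_alt s = flushFn ((linesFn s.toList).foldl stepB' (0, 0)) := by
  unfold compute_alt flushFn
  rw [split_lines_str, List.foldl_map]
  rfl

theorem main_thm (s : String) (hpre : Pre_compute s) : compute s = compute_alt s := by
  rw [compute_eq, compute_alt_eq, lines_decomp]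
  rw [stream_eq _ 0 _ (groupsFn_ne_nil _)]
  unfold Pre_compute at hpre
  rw [split_groups_str] at hpre
  intro g hgmem l hlmem
  have := hpre (String.ofList g) (List.mem_map_of_mem hgmem)
  rw [split_lines_str, String.toList_ofList] at this
  exact this (String.ofList l) (List.mem_map_of_mem hlmem)

-- ===== VERDICT (by name: the statement is the Claim_ definition above) =====
theorem compute_spec : Claim_equal_compute := by
  intro s _ hpre
  unfold Spec_compute
  exact main_thm s hpre
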